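-- pv_equiv track=rewrite | github.com/tamanna293/Bloom_Taxonomy | classifier/nlp_classifier.py | construct_decision_matrix
-- ===== SOURCE A (Python) =====
-- def construct_decision_matrix(y_true, y_pred):
--     levels = sorted(set(y_true))  # Unique Bloom's Taxonomy levels
--     matrix = {level: {'TP': 0, 'FP': 0, 'FN': 0, 'TN': 0} for level in levels}
--
--     for true, pred in zip(y_true, y_pred):
--         if true == pred:
--             matrix[true]['TP'] += 1
--             for level in levels:
--                 if level != true:
--                     matrix[level]['TN'] += 1
--         else:
--             matrix[pred]['FP'] += 1
--             matrix[true]['FN'] += 1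
--             for level in levels:
--                 if level != true and level != pred:
--                     matrix[level]['TN'] += 1
--
--     return matrix
-- ===== SOURCE B (Python) =====
-- def construct_decision_matrix(y_true, y_pred):
--     levels = sorted(set(y_true))
--     tp = dict.fromkeys(levels, 0)
--     fp = dict.fromkeys(levels, 0)
--     fn = dict.fromkeys(levels, 0)
--     n = 0
--     for t, p in zip(y_true, y_pred):
--         n += 1
--         if t == p:
--             tp[t] += 1
--         else:
--             fp[p] += 1
--             fn[t] += 1
--     return {l: {'TP': tp[l], 'FP': fp[l], 'FN': fn[l], 'TN': n - tp[l] - fp[l] - fn[l]}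
--             for l in levels}
-- ===== Notes on version B (the rewrite author's own statement) =====
-- stated objective: alternative
-- what changed: Replaces A's per-sample inner loop over all levels (incrementing TN for every non-matching level) by a single counting pass that maintains per-level TP/FP/FN in pre-initialized counters and derives TN as n - TP - FP - FN, since each zipped sample contributes exactly one cell to every level's row.
import Mathlib
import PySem

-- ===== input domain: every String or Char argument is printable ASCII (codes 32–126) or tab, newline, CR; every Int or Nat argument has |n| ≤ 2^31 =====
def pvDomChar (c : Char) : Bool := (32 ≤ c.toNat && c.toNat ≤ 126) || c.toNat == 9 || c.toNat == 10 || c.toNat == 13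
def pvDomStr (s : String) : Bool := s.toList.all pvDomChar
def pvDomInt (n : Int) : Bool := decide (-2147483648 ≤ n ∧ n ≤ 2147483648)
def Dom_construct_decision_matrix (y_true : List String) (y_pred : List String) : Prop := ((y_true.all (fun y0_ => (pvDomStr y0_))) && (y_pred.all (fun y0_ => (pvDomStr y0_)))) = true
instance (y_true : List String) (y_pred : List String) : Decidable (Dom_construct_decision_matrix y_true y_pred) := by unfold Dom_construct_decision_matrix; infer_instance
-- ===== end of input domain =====

-- B replaces A's per-sample inner loop over all levels by one pass counting TP/FP/FN per level,
-- deriving TN = n - TP - FP - FN (each zipped sample contributes exactly one cell to every level's row).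

-- ===== PORT A =====
-- {'TP': 0, 'FP': 0, 'FN': 0, 'TN': 0}
def pvZeroRow : PySem.Dict String Int :=
  PySem.Dict.ofList [("TP", 0), ("FP", 0), ("FN", 0), ("TN", 0)]

-- row[field] += 1  (the field key is always present; the default is never reached on rows A builds)
def pvBump (field : String) (r : PySem.Dict String Int) : PySem.Dict String Int :=
  r.modify field 0 (· + 1)

-- the body of A's 'for true, pred in zip(...)' loop; matrix[k][f] += 1 is matrix.modify k (inner bump)
-- (the Dict.empty default of the outer modify is reached only where Python A raises KeyError, i.e. outside Pre_)
def pvStepA (levels : List String) (m : PySem.Dict String (PySem.Dict String Int))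
    (pr : String × String) : PySem.Dict String (PySem.Dict String Int) :=
  if pr.1 = pr.2 then
    let m1 := m.modify pr.1 PySem.Dict.empty (pvBump "TP")
    levels.foldl (fun m2 level => if level ≠ pr.1 then m2.modify level PySem.Dict.empty (pvBump "TN") else m2) m1
  else
    let m1 := m.modify pr.2 PySem.Dict.empty (pvBump "FP")
    let m2 := m1.modify pr.1 PySem.Dict.empty (pvBump "FN")
    levels.foldl (fun m3 level => if level ≠ pr.1 ∧ level ≠ pr.2 then m3.modify level PySem.Dict.empty (pvBump "TN") else m3) m2

def construct_decision_matrix (y_true : List String) (y_pred : List String) : List (String × List (String × Int)) :=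
  let levels := PySem.List.sorted (PySem.Set.ofList y_true) (fun x => x) false
  let matrix0 := levels.foldl (fun m level => m.insert level pvZeroRow) PySem.Dict.empty
  let matrix := (y_true.zip y_pred).foldl (pvStepA levels) matrix0
  matrix.items.map (fun p => (p.1, p.2.items))

-- ===== PORT B =====
-- dict.fromkeys(levels, 0)
def pvZeros (levels : List String) : PySem.Dict String Int :=
  levels.foldl (fun d l => d.insert l 0) PySem.Dict.empty

-- the body of B's counting loop, state (n, tp, fp, fn); d[k] += 1 is d.modify k 0 (+1)
-- (the 0 default of modify is reached only where Python B raises KeyError, i.e. outside Pre_)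
def pvStepB (st : Int × PySem.Dict String Int × PySem.Dict String Int × PySem.Dict String Int)
    (pr : String × String) : Int × PySem.Dict String Int × PySem.Dict String Int × PySem.Dict String Int :=
  let n := st.1; let tp := st.2.1; let fp := st.2.2.1; let fn := st.2.2.2
  if pr.1 = pr.2 then (n + 1, tp.modify pr.1 0 (· + 1), fp, fn)
  else (n + 1, tp, fp.modify pr.2 0 (· + 1), fn.modify pr.1 0 (· + 1))

def construct_decision_matrix_alt (y_true : List String) (y_pred : List String) : List (String × List (String × Int)) :=
  let levels := PySem.List.sorted (PySem.Set.ofList y_true) (fun x => x) false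
  let st := (y_true.zip y_pred).foldl pvStepB
    (0, pvZeros levels, pvZeros levels, pvZeros levels)
  let matrix := levels.foldl (fun m level =>
      let a := st.2.1.getD level 0
      let b := st.2.2.1.getD level 0
      let c := st.2.2.2.getD level 0
      m.insert level (PySem.Dict.ofList [("TP", a), ("FP", b), ("FN", c), ("TN", st.1 - a - b - c)]))
    PySem.Dict.empty
  matrix.items.map (fun p => (p.1, p.2.items))

-- ===== PRECONDITION & SPEC =====
-- Pre_ excludes exactly the inputs where Python A raises KeyError: a zipped pair with true != pred whose pred never occurs in y_true.
def Pre_construct_decision_matrix (y_true : List String) (y_pred : List String) : Prop :=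
  ∀ pr ∈ y_true.zip y_pred, pr.1 ≠ pr.2 → pr.2 ∈ y_true
instance (y_true : List String) (y_pred : List String) : Decidable (Pre_construct_decision_matrix y_true y_pred) := by unfold Pre_construct_decision_matrix; infer_instance
def pvWitness_construct_decision_matrix : List String × List String := (["a", "b", "a"], ["a", "a", "b"])

def Spec_construct_decision_matrix (y_true : List String) (y_pred : List String) (out : List (String × List (String × Int))) : Prop := out = construct_decision_matrix_alt y_true y_pred
instance (y_true : List String) (y_pred : List String) (out : List (String × List (String × Int))) : Decidable (Spec_construct_decision_matrix y_true y_pred out) := by unfold Spec_construct_decision_matrix; infer_instance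

-- ===== CLAIM (what is proved, stated in full; the proofs are below) =====
def Claim_equal_construct_decision_matrix : Prop := ∀ (y_true : List String) (y_pred : List String), Dom_construct_decision_matrix y_true y_pred → Pre_construct_decision_matrix y_true y_pred → Spec_construct_decision_matrix y_true y_pred (construct_decision_matrix y_true y_pred)

-- ===== LEMMAS AND PROOFS =====

-- per-level contribution counts over the zipped pairs
def pvCTP (l : String) (ps : List (String × String)) : Int :=
  (ps.countP (fun pr => decide (pr.1 = l ∧ pr.1 = pr.2)) : Int)
def pvCFP (l : String) (ps : List (String × String)) : Int :=
  (ps.countP (fun pr => decide (pr.2 = l ∧ pr.1 ≠ pr.2)) : Int)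
def pvCFN (l : String) (ps : List (String × String)) : Int :=
  (ps.countP (fun pr => decide (pr.1 = l ∧ pr.1 ≠ pr.2)) : Int)
def pvCTN (l : String) (ps : List (String × String)) : Int :=
  (ps.countP (fun pr => decide (l ≠ pr.1 ∧ l ≠ pr.2)) : Int)

def pvRowD (a b c d : Int) : PySem.Dict String Int :=
  PySem.Dict.mk [("TP", a), ("FP", b), ("FN", c), ("TN", d)]

def pvState (levels : List String) (gTP gFP gFN gTN : String → Int) :
    PySem.Dict String (PySem.Dict String Int) :=
  PySem.Dict.mk (levels.map (fun l => (l, pvRowD (gTP l) (gFP l) (gFN l) (gTN l))))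

lemma pvState_congr (levels : List String) (gTP gFP gFN gTN gTP' gFP' gFN' gTN' : String → Int)
    (h : ∀ l ∈ levels, gTP l = gTP' l ∧ gFP l = gFP' l ∧ gFN l = gFN' l ∧ gTN l = gTN' l) :
    pvState levels gTP gFP gFN gTN = pvState levels gTP' gFP' gFN' gTN' := by
  unfold pvState
  congr 1
  exact List.map_congr_left (fun l hl => by obtain ⟨h1, h2, h3, h4⟩ := h l hl; rw [h1, h2, h3, h4])

lemma pvState_keys (levels : List String) (gTP gFP gFN gTN : String → Int) :
    (pvState levels gTP gFP gFN gTN).keys = levels := by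
  simp [pvState, PySem.Dict.keys, Function.comp_def]

lemma pvState_modify (levels : List String) (hnd : levels.Nodup) (k : String) (hk : k ∈ levels)
    (f : PySem.Dict String Int → PySem.Dict String Int) (gTP gFP gFN gTN : String → Int) :
    (pvState levels gTP gFP gFN gTN).modify k PySem.Dict.empty f =
      PySem.Dict.mk (levels.map (fun l => (l,
        if l = k then f (pvRowD (gTP k) (gFP k) (gFN k) (gTN k))
        else pvRowD (gTP l) (gFP l) (gFN l) (gTN l)))) := by
  have hkeys := pvState_keys levels gTP gFP gFN gTN
  have hc : (pvState levels gTP gFP gFN gTN).contains k = true := by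
    rw [PySem.Dict.contains_iff_mem_keys, hkeys]; exact hk
  have hmem : (k, pvRowD (gTP k) (gFP k) (gFN k) (gTN k)) ∈ (pvState levels gTP gFP gFN gTN).items := by
    simp only [pvState]
    exact List.mem_map.mpr ⟨k, hk, rfl⟩
  have hgetD : (pvState levels gTP gFP gFN gTN).getD k PySem.Dict.empty
      = pvRowD (gTP k) (gFP k) (gFN k) (gTN k) :=
    PySem.Dict.getD_of_mem_items _ hmem (by rw [hkeys]; exact hnd) _
  rw [PySem.Dict.modify, hgetD]
  apply PySem.Dict.ext
  rw [PySem.Dict.items_insert_of_contains _ _ hc]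
  simp only [pvState, List.map_map]
  apply List.map_congr_left
  intro l _
  by_cases h : l = k <;> simp [h]

lemma pvBump_row (a b c d : Int) :
    pvBump "TP" (pvRowD a b c d) = pvRowD (a + 1) b c d ∧
    pvBump "FP" (pvRowD a b c d) = pvRowD a (b + 1) c d ∧
    pvBump "FN" (pvRowD a b c d) = pvRowD a b (c + 1) d ∧
    pvBump "TN" (pvRowD a b c d) = pvRowD a b c (d + 1) := by
  refine ⟨rfl, rfl, rfl, rfl⟩

lemma pvFoldTN (levels : List String) (hnd : levels.Nodup) (cond : String → Prop)
    [DecidablePred cond] :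
    ∀ (ks : List String), (∀ k ∈ ks, k ∈ levels) → ks.Nodup →
    ∀ gTP gFP gFN gTN : String → Int,
    ks.foldl (fun m level => if cond level then m.modify level PySem.Dict.empty (pvBump "TN") else m)
        (pvState levels gTP gFP gFN gTN)
      = pvState levels gTP gFP gFN (fun l => if l ∈ ks ∧ cond l then gTN l + 1 else gTN l) := by
  intro ks
  induction ks with
  | nil =>
    intro _ _ gTP gFP gFN gTN
    simp only [List.foldl_nil]
    exact pvState_congr _ _ _ _ _ _ _ _ _ (fun l _ => by simp)
  | cons k ks ih =>
    intro hsub hnodup gTP gFP gFN gTN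
    have hk : k ∈ levels := hsub k (List.mem_cons_self)
    have hknot : k ∉ ks := (List.nodup_cons.mp hnodup).1
    have hnd' := (List.nodup_cons.mp hnodup).2
    have hsub' : ∀ x ∈ ks, x ∈ levels := fun x hx => hsub x (List.mem_cons_of_mem _ hx)
    simp only [List.foldl_cons]
    by_cases hc : cond k
    · rw [if_pos hc, pvState_modify levels hnd k hk]
      have hstate : PySem.Dict.mk (levels.map (fun l => (l,
            if l = k then pvBump "TN" (pvRowD (gTP k) (gFP k) (gFN k) (gTN k))
            else pvRowD (gTP l) (gFP l) (gFN l) (gTN l))))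
          = pvState levels gTP gFP gFN (fun l => if l = k then gTN l + 1 else gTN l) := by
        unfold pvState
        congr 1
        apply List.map_congr_left
        intro l _
        by_cases h : l = k
        · subst h; simp [(pvBump_row (gTP l) (gFP l) (gFN l) (gTN l)).2.2.2]
        · simp [h]
      rw [hstate, ih hsub' hnd']
      refine pvState_congr _ _ _ _ _ _ _ _ _ (fun l _ => ⟨rfl, rfl, rfl, ?_⟩)
      by_cases h : l = k
      · subst h; simp [hknot, hc]
      · simp [h, List.mem_cons]
    · rw [if_neg hc, ih hsub' hnd']
      refine pvState_congr _ _ _ _ _ _ _ _ _ (fun l _ => ⟨rfl, rfl, rfl, ?_⟩)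
      by_cases h : l = k
      · subst h; simp [hc]
      · simp [h, List.mem_cons]

lemma pvCTP_cons (l : String) (pr : String × String) (ps : List (String × String)) :
    pvCTP l (pr :: ps) = pvCTP l ps + (if pr.1 = l ∧ pr.1 = pr.2 then 1 else 0) := by
  unfold pvCTP; rw [List.countP_cons]; by_cases h : pr.1 = l ∧ pr.1 = pr.2 <;> simp [h]

lemma pvCFP_cons (l : String) (pr : String × String) (ps : List (String × String)) :
    pvCFP l (pr :: ps) = pvCFP l ps + (if pr.2 = l ∧ pr.1 ≠ pr.2 then 1 else 0) := by
  unfold pvCFP; rw [List.countP_cons]; by_cases h : pr.2 = l ∧ pr.1 ≠ pr.2 <;> simp [h]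

lemma pvCFN_cons (l : String) (pr : String × String) (ps : List (String × String)) :
    pvCFN l (pr :: ps) = pvCFN l ps + (if pr.1 = l ∧ pr.1 ≠ pr.2 then 1 else 0) := by
  unfold pvCFN; rw [List.countP_cons]; by_cases h : pr.1 = l ∧ pr.1 ≠ pr.2 <;> simp [h]

lemma pvCTN_cons (l : String) (pr : String × String) (ps : List (String × String)) :
    pvCTN l (pr :: ps) = pvCTN l ps + (if l ≠ pr.1 ∧ l ≠ pr.2 then 1 else 0) := by
  unfold pvCTN; rw [List.countP_cons]; by_cases h : l ≠ pr.1 ∧ l ≠ pr.2 <;> simp [h]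

lemma pvStepA_eq_of_eq (levels : List String) (hnd : levels.Nodup) (t p : String)
    (htp : t = p) (ht : t ∈ levels) (gTP gFP gFN gTN : String → Int) :
    pvStepA levels (pvState levels gTP gFP gFN gTN) (t, p)
      = pvState levels (fun l => if l = t then gTP l + 1 else gTP l) gFP gFN
          (fun l => if l ∈ levels ∧ l ≠ t then gTN l + 1 else gTN l) := by
  simp only [pvStepA]
  rw [if_pos htp, pvState_modify levels hnd t ht]
  have hstate : PySem.Dict.mk (levels.map (fun l => (l,
        if l = t then pvBump "TP" (pvRowD (gTP t) (gFP t) (gFN t) (gTN t))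
        else pvRowD (gTP l) (gFP l) (gFN l) (gTN l))))
      = pvState levels (fun l => if l = t then gTP l + 1 else gTP l) gFP gFN gTN := by
    unfold pvState
    congr 1
    apply List.map_congr_left
    intro l _
    by_cases h : l = t
    · subst h; simp [(pvBump_row (gTP l) (gFP l) (gFN l) (gTN l)).1]
    · simp [h]
  rw [hstate, pvFoldTN levels hnd (fun level => level ≠ t) levels (fun x hx => hx) hnd]

lemma pvStepA_eq_of_ne (levels : List String) (hnd : levels.Nodup) (t p : String)
    (htp : t ≠ p) (ht : t ∈ levels) (hp : p ∈ levels) (gTP gFP gFN gTN : String → Int) :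
    pvStepA levels (pvState levels gTP gFP gFN gTN) (t, p)
      = pvState levels gTP (fun l => if l = p then gFP l + 1 else gFP l)
          (fun l => if l = t then gFN l + 1 else gFN l)
          (fun l => if l ∈ levels ∧ (l ≠ t ∧ l ≠ p) then gTN l + 1 else gTN l) := by
  simp only [pvStepA]
  rw [if_neg htp, pvState_modify levels hnd p hp]
  have hstate1 : PySem.Dict.mk (levels.map (fun l => (l,
        if l = p then pvBump "FP" (pvRowD (gTP p) (gFP p) (gFN p) (gTN p))
        else pvRowD (gTP l) (gFP l) (gFN l) (gTN l))))
      = pvState levels gTP (fun l => if l = p then gFP l + 1 else gFP l) gFN gTN := by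
    unfold pvState
    congr 1
    apply List.map_congr_left
    intro l _
    by_cases h : l = p
    · subst h; simp [(pvBump_row (gTP l) (gFP l) (gFN l) (gTN l)).2.1]
    · simp [h]
  rw [hstate1, pvState_modify levels hnd t ht]
  have hstate2 : PySem.Dict.mk (levels.map (fun l => (l,
        if l = t then pvBump "FN" (pvRowD (gTP t) (if t = p then gFP t + 1 else gFP t) (gFN t) (gTN t))
        else pvRowD (gTP l) (if l = p then gFP l + 1 else gFP l) (gFN l) (gTN l))))
      = pvState levels gTP (fun l => if l = p then gFP l + 1 else gFP l)
          (fun l => if l = t then gFN l + 1 else gFN l) gTN := by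
    unfold pvState
    congr 1
    apply List.map_congr_left
    intro l _
    by_cases h : l = t
    · subst h
      simp [(pvBump_row (gTP l) (if l = p then gFP l + 1 else gFP l) (gFN l) (gTN l)).2.2.1]
    · simp [h]
  rw [hstate2, pvFoldTN levels hnd (fun level => level ≠ t ∧ level ≠ p) levels (fun x hx => hx) hnd]

lemma pvFoldA (levels : List String) (hnd : levels.Nodup) :
    ∀ (ps : List (String × String)),
      (∀ pr ∈ ps, pr.1 ∈ levels ∧ (pr.1 ≠ pr.2 → pr.2 ∈ levels)) →
    ∀ gTP gFP gFN gTN : String → Int,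
    ps.foldl (pvStepA levels) (pvState levels gTP gFP gFN gTN)
      = pvState levels (fun l => gTP l + pvCTP l ps) (fun l => gFP l + pvCFP l ps)
          (fun l => gFN l + pvCFN l ps) (fun l => gTN l + pvCTN l ps) := by
  intro ps
  induction ps with
  | nil =>
    intro _ gTP gFP gFN gTN
    simp only [List.foldl_nil]
    exact pvState_congr _ _ _ _ _ _ _ _ _ (fun l _ => by simp [pvCTP, pvCFP, pvCFN, pvCTN])
  | cons pr ps ih =>
    intro hps gTP gFP gFN gTN
    obtain ⟨t, p⟩ := pr
    have hpr := hps (t, p) (List.mem_cons_self)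
    have ht : t ∈ levels := hpr.1
    have hps' : ∀ q ∈ ps, q.1 ∈ levels ∧ (q.1 ≠ q.2 → q.2 ∈ levels) :=
      fun q hq => hps q (List.mem_cons_of_mem _ hq)
    simp only [List.foldl_cons]
    by_cases htp : t = p
    · rw [pvStepA_eq_of_eq levels hnd t p htp ht, ih hps']
      refine pvState_congr _ _ _ _ _ _ _ _ _ (fun l hl => ?_)
      rw [pvCTP_cons, pvCFP_cons, pvCFN_cons, pvCTN_cons]
      refine ⟨?_, ?_, ?_, ?_⟩ <;> simp only [hl, true_and] <;>
        by_cases h : l = t <;> simp [h, htp] <;> first | omega | (split_ifs <;> first | omega | simp_all)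
    · rw [pvStepA_eq_of_ne levels hnd t p htp ht (hpr.2 htp), ih hps']
      refine pvState_congr _ _ _ _ _ _ _ _ _ (fun l hl => ?_)
      rw [pvCTP_cons, pvCFP_cons, pvCFN_cons, pvCTN_cons]
      refine ⟨?_, ?_, ?_, ?_⟩ <;> simp only [hl, true_and] <;>
        by_cases h : l = t <;> by_cases h2 : l = p <;> simp [h, h2, htp] <;>
          first | omega | simp_all [eq_comm]

lemma pvFoldB (ps : List (String × String)) :
    ∀ st : Int × PySem.Dict String Int × PySem.Dict String Int × PySem.Dict String Int,
    (ps.foldl pvStepB st).1 = st.1 + (ps.length : Int) ∧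
    (∀ l, (ps.foldl pvStepB st).2.1.getD l 0 = st.2.1.getD l 0 + pvCTP l ps) ∧
    (∀ l, (ps.foldl pvStepB st).2.2.1.getD l 0 = st.2.2.1.getD l 0 + pvCFP l ps) ∧
    (∀ l, (ps.foldl pvStepB st).2.2.2.getD l 0 = st.2.2.2.getD l 0 + pvCFN l ps) := by
  induction ps with
  | nil => intro st; simp [pvCTP, pvCFP, pvCFN]
  | cons pr ps ih =>
    intro st
    obtain ⟨t, p⟩ := pr
    simp only [List.foldl_cons]
    by_cases htp : t = p
    · have hstep : pvStepB st (t, p)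
          = (st.1 + 1, st.2.1.modify t 0 (· + 1), st.2.2.1, st.2.2.2) := by
        simp [pvStepB, htp]
      rw [hstep]
      obtain ⟨h1, h2, h3, h4⟩ := ih (st.1 + 1, st.2.1.modify t 0 (· + 1), st.2.2.1, st.2.2.2)
      refine ⟨?_, ?_, ?_, ?_⟩
      · rw [h1]; simp; omega
      · intro l
        rw [h2 l, PySem.Dict.getD_modify, pvCTP_cons]
        by_cases h : l = t
        · subst h; rw [if_pos rfl, if_pos ⟨rfl, htp⟩]; omega
        · rw [if_neg h, if_neg (fun hc => h hc.1.symm)]; omega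
      · intro l; rw [h3 l, pvCFP_cons]; simp [htp]
      · intro l; rw [h4 l, pvCFN_cons]; simp [htp]
    · have hstep : pvStepB st (t, p)
          = (st.1 + 1, st.2.1, st.2.2.1.modify p 0 (· + 1), st.2.2.2.modify t 0 (· + 1)) := by
        simp [pvStepB, htp]
      rw [hstep]
      obtain ⟨h1, h2, h3, h4⟩ := ih (st.1 + 1, st.2.1, st.2.2.1.modify p 0 (· + 1),
        st.2.2.2.modify t 0 (· + 1))
      refine ⟨?_, ?_, ?_, ?_⟩
      · rw [h1]; simp; omega
      · intro l; rw [h2 l, pvCTP_cons]; simp [htp]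
      · intro l
        rw [h3 l, PySem.Dict.getD_modify, pvCFP_cons]
        by_cases h : l = p
        · subst h; rw [if_pos rfl, if_pos ⟨rfl, htp⟩]; omega
        · rw [if_neg h, if_neg (fun hc => h hc.1.symm)]; omega
      · intro l
        rw [h4 l, PySem.Dict.getD_modify, pvCFN_cons]
        by_cases h : l = t
        · subst h; rw [if_pos rfl, if_pos ⟨rfl, htp⟩]; omega
        · rw [if_neg h, if_neg (fun hc => h hc.1.symm)]; omega

lemma pvCountsSum (l : String) (ps : List (String × String)) :
    pvCTP l ps + pvCFP l ps + pvCFN l ps + pvCTN l ps = (ps.length : Int) := by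
  induction ps with
  | nil => simp [pvCTP, pvCFP, pvCFN, pvCTN]
  | cons pr ps ih =>
    rw [pvCTP_cons, pvCFP_cons, pvCFN_cons, pvCTN_cons]
    simp only [List.length_cons]
    push_cast
    obtain ⟨t, p⟩ := pr
    by_cases hC : t = p
    · subst hC
      by_cases hA : t = l
      · subst hA; simp; omega
      · simp [hA, Ne.symm hA]; omega
    · by_cases hA : t = l
      · subst hA; simp [hC, Ne.symm hC]; omega
      · by_cases hB : p = l
        · subst hB; simp [hC, Ne.symm hC]; omega
        · simp [hA, hB, hC, Ne.symm hA, Ne.symm hB]; omega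

lemma pvZeroRow_eq : pvZeroRow = pvRowD 0 0 0 0 := rfl

lemma pvZeros_getD (levels : List String) (l : String) : (pvZeros levels).getD l 0 = 0 := by
  unfold pvZeros
  suffices h : ∀ (ls : List String) (d : PySem.Dict String Int), d.getD l 0 = 0 →
      (ls.foldl (fun d l => d.insert l 0) d).getD l 0 = 0 from
    h levels PySem.Dict.empty (PySem.Dict.getD_empty l 0)
  intro ls
  induction ls with
  | nil => intro d hd; simpa using hd
  | cons x xs ih =>
    intro d hd
    simp only [List.foldl_cons]
    exact ih _ (by rw [PySem.Dict.getD_insert]; split_ifs <;> simp [hd])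

lemma pvRowD_items (a b c d : Int) :
    (pvRowD a b c d).items = [("TP", a), ("FP", b), ("FN", c), ("TN", d)] := rfl

lemma pvOfListRow_eq (a b c d : Int) :
    PySem.Dict.ofList [("TP", a), ("FP", b), ("FN", c), ("TN", d)] = pvRowD a b c d := rfl

theorem construct_decision_matrix_spec : Claim_equal_construct_decision_matrix := by
  intro yt yp _ hpre
  unfold Spec_construct_decision_matrix construct_decision_matrix construct_decision_matrix_alt
  simp only []
  set levels := PySem.List.sorted (PySem.Set.ofList yt) (fun x => x) false with hlev
  have hmemlev : ∀ x, x ∈ levels ↔ x ∈ yt := fun x => by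
    rw [hlev, PySem.List.mem_sorted, PySem.Set.mem_ofList]
  have hnd : levels.Nodup :=
    ((PySem.List.sorted_perm (PySem.Set.ofList yt) (fun x => x) false).nodup_iff).mpr
      (PySem.Set.nodup_ofList yt)
  -- A's initial matrix of zero rows
  have hinit : levels.foldl (fun m level => m.insert level pvZeroRow) PySem.Dict.empty
      = pvState levels (fun _ => 0) (fun _ => 0) (fun _ => 0) (fun _ => 0) := by
    apply PySem.Dict.ext
    have h := PySem.Dict.items_foldl_insert_fresh levels (fun l => l) (fun _ => pvZeroRow)
      PySem.Dict.empty (fun a _ => PySem.Dict.contains_empty a) (by simpa using hnd)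
    simpa [pvState, pvZeroRow_eq] using h
  rw [hinit]
  -- A's pair loop
  rw [pvFoldA levels hnd (yt.zip yp)
    (fun pr hpr => ⟨(hmemlev pr.1).mpr ((List.of_mem_zip (by exact hpr)).1),
      fun hne => (hmemlev pr.2).mpr (hpre pr hpr hne)⟩)]
  -- B's counting state
  obtain ⟨hn, htp, hfp, hfn⟩ := pvFoldB (yt.zip yp)
    (0, pvZeros levels, pvZeros levels, pvZeros levels)
  -- B's matrix loop appends fresh keys
  have hBm := PySem.Dict.items_foldl_insert_fresh levels (fun l => l)
    (fun level => PySem.Dict.ofList [("TP", ((yt.zip yp).foldl pvStepB (0, pvZeros levels, pvZeros levels, pvZeros levels)).2.1.getD level 0),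
      ("FP", ((yt.zip yp).foldl pvStepB (0, pvZeros levels, pvZeros levels, pvZeros levels)).2.2.1.getD level 0),
      ("FN", ((yt.zip yp).foldl pvStepB (0, pvZeros levels, pvZeros levels, pvZeros levels)).2.2.2.getD level 0),
      ("TN", ((yt.zip yp).foldl pvStepB (0, pvZeros levels, pvZeros levels, pvZeros levels)).1
        - ((yt.zip yp).foldl pvStepB (0, pvZeros levels, pvZeros levels, pvZeros levels)).2.1.getD level 0
        - ((yt.zip yp).foldl pvStepB (0, pvZeros levels, pvZeros levels, pvZeros levels)).2.2.1.getD level 0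
        - ((yt.zip yp).foldl pvStepB (0, pvZeros levels, pvZeros levels, pvZeros levels)).2.2.2.getD level 0)])
    PySem.Dict.empty (fun a _ => PySem.Dict.contains_empty a) (by simpa using hnd)
  rw [hBm]
  have hempty : (PySem.Dict.empty : PySem.Dict String (PySem.Dict String Int)).items = [] := rfl
  simp only [pvState, hempty, List.map_map, List.nil_append]
  apply List.map_congr_left
  intro l hl
  simp only [Function.comp]
  refine Prod.ext rfl ?_
  rw [pvOfListRow_eq, pvRowD_items, pvRowD_items]
  rw [htp l, hfp l, hfn l, hn]
  have hsum := pvCountsSum l (yt.zip yp)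
  simp only [pvZeros_getD]
  have hTN : (0:Int) + pvCTN l (yt.zip yp)
      = 0 + ((yt.zip yp).length : Int) - (0 + pvCTP l (yt.zip yp)) - (0 + pvCFP l (yt.zip yp))
        - (0 + pvCFN l (yt.zip yp)) := by omega
  rw [hTN]
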